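-- pv_equiv track=rewrite | github.com/NSI-Termianle-2021-2022/NSI-Premiere | Theme D/DM_pyramide/placek_samuel_akhoun_alexandre.py | floor_offset
-- ===== SOURCE A (Python) =====
-- def floor_offset(nber_passages1 : int, nber_passages2 : int, nber_passages3 : int , floor_height : int, star_increase : int, spacing : int) -> tuple:
--     while floor_height > 5 and floor_height % 3 == 0:
--         for i in range(nber_passages1):
--             star_increase += 2
--             spacing -= 1
--         nber_passages1 += 1
--         break
--     while floor_height > 5 and ispremier(floor_height) == True:
--         for i in range(nber_passages2):
--             star_increase += 2
--             spacing -= 1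
--         nber_passages2 += 1
--         break
--     while floor_height > 5 and not floor_height % 3 == 0 and not ispremier(floor_height) == True:
--         for i in range(nber_passages3):
--             star_increase += 2
--             spacing -= 1
--         nber_passages3 += 1
--         break
--     return nber_passages1, nber_passages2, nber_passages3, star_increase, spacing
--
-- def ispremier(n : int) -> bool:
--     i = 2
--     while i < n and n % i != 0:
--         i += 1
--     if i == n:
--         return True
--     else:
--         return False
-- ===== SOURCE B (Python) =====
-- def _is_prime(n: int) -> bool:
--     if n < 2:
--         return False
--     if n % 2 == 0:
--         return n == 2
--     d = 3
--     while d * d <= n: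
--         if n % d == 0:
--             return False
--         d += 2
--     return True
--
-- def floor_offset(nber_passages1: int, nber_passages2: int, nber_passages3: int, floor_height: int, star_increase: int, spacing: int) -> tuple:
--     if floor_height > 5:
--         if floor_height % 3 == 0:
--             k = nber_passages1
--             nber_passages1 += 1
--         elif _is_prime(floor_height):
--             k = nber_passages2
--             nber_passages2 += 1
--         else:
--             k = nber_passages3
--             nber_passages3 += 1
--         k = max(k, 0)
--         star_increase += 2 * k
--         spacing -= k
--     return nber_passages1, nber_passages2, nber_passages3, star_increase, spacing
-- ===== Notes on version B (the rewrite author's own statement) =====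
-- stated objective: faster
-- what changed: Replaces A's three sequential while/break blocks with inner counting loops and an O(n) trial division up to n by a single if/elif/else whose star/spacing updates are closed-form arithmetic (star += 2*max(k,0), spacing -= max(k,0)) and whose primality test is sqrt-bounded odd trial division.
import Mathlib
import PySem

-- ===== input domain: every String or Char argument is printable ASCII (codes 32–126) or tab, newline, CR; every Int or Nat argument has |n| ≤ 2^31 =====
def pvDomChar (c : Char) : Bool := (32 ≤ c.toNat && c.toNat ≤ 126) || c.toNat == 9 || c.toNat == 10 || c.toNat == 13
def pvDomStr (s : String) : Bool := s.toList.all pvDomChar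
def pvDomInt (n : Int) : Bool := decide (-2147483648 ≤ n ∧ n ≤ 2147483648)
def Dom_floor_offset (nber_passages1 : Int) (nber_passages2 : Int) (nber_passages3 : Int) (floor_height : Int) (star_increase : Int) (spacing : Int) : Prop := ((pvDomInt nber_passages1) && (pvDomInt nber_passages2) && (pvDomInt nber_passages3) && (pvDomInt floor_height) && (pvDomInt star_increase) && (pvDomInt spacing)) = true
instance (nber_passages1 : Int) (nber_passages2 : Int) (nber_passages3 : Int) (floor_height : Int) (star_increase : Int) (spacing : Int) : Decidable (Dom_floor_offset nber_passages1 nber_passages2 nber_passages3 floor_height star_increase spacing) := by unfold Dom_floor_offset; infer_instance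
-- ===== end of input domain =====

-- B replaces A's counting loops by closed-form arithmetic and A's O(n) trial division by a
-- sqrt-bounded odd trial division (objective: faster).

-- ===== PORT A =====
-- while i < n and n % i != 0: i += 1   (returns the final i)
def ispremierLoop (n : Int) (i : Int) : Int :=
  if i < n ∧ PySem.Int.mod n i ≠ 0 then ispremierLoop n (i + 1) else i
termination_by (n - i).toNat
decreasing_by omega

def ispremier (n : Int) : Bool :=
  let i := ispremierLoop n 2
  if i = n then true else false

-- for i in range(k): star_increase += 2; spacing -= 1   (threaded as a pair)
def passLoop (k : Int) (star_increase : Int) (spacing : Int) : Int × Int :=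
  (PySem.List.pyRange 0 k 1).foldl (fun st _ => (st.1 + 2, st.2 - 1)) (star_increase, spacing)

-- third while-with-break block
def floorBlock3 (nber_passages1 nber_passages2 nber_passages3 floor_height star_increase spacing : Int) : List Int :=
  if floor_height > 5 ∧ ¬ PySem.Int.mod floor_height 3 = 0 ∧ ¬ ispremier floor_height = true then
    let st := passLoop nber_passages3 star_increase spacing
    [nber_passages1, nber_passages2, nber_passages3 + 1, st.1, st.2]
  else
    [nber_passages1, nber_passages2, nber_passages3, star_increase, spacing]

-- second while-with-break block
def floorBlock2 (nber_passages1 nber_passages2 nber_passages3 floor_height star_increase spacing : Int) : List Int :=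
  if floor_height > 5 ∧ ispremier floor_height = true then
    let st := passLoop nber_passages2 star_increase spacing
    floorBlock3 nber_passages1 (nber_passages2 + 1) nber_passages3 floor_height st.1 st.2
  else
    floorBlock3 nber_passages1 nber_passages2 nber_passages3 floor_height star_increase spacing

def floor_offset (nber_passages1 : Int) (nber_passages2 : Int) (nber_passages3 : Int) (floor_height : Int) (star_increase : Int) (spacing : Int) : List Int :=
  if floor_height > 5 ∧ PySem.Int.mod floor_height 3 = 0 then
    let st := passLoop nber_passages1 star_increase spacing
    floorBlock2 (nber_passages1 + 1) nber_passages2 nber_passages3 floor_height st.1 st.2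
  else
    floorBlock2 nber_passages1 nber_passages2 nber_passages3 floor_height star_increase spacing

-- ===== PORT B =====
-- while d*d <= n: if n % d == 0: return False; d += 2   (fuel only makes the loop total)
def isPrimeAltLoop (n : Int) : Nat → Int → Bool
  | 0, _ => true
  | fuel + 1, d =>
    if d * d ≤ n then
      if PySem.Int.mod n d = 0 then false else isPrimeAltLoop n fuel (d + 2)
    else true

def isPrimeAlt (n : Int) : Bool :=
  if n < 2 then false
  else if PySem.Int.mod n 2 = 0 then n == 2
  else isPrimeAltLoop n n.toNat 3

def floor_offset_alt (nber_passages1 : Int) (nber_passages2 : Int) (nber_passages3 : Int) (floor_height : Int) (star_increase : Int) (spacing : Int) : List Int :=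
  if floor_height > 5 then
    if PySem.Int.mod floor_height 3 = 0 then
      let k := max nber_passages1 0
      [nber_passages1 + 1, nber_passages2, nber_passages3, star_increase + 2 * k, spacing - k]
    else if isPrimeAlt floor_height then
      let k := max nber_passages2 0
      [nber_passages1, nber_passages2 + 1, nber_passages3, star_increase + 2 * k, spacing - k]
    else
      let k := max nber_passages3 0
      [nber_passages1, nber_passages2, nber_passages3 + 1, star_increase + 2 * k, spacing - k]
  else
    [nber_passages1, nber_passages2, nber_passages3, star_increase, spacing]

-- ===== PRECONDITION & SPEC =====
def Spec_floor_offset (nber_passages1 : Int) (nber_passages2 : Int) (nber_passages3 : Int) (floor_height : Int) (star_increase : Int) (spacing : Int) (out : List Int) : Prop := out = floor_offset_alt nber_passages1 nber_passages2 nber_passages3 floor_height star_increase spacing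
instance (nber_passages1 : Int) (nber_passages2 : Int) (nber_passages3 : Int) (floor_height : Int) (star_increase : Int) (spacing : Int) (out : List Int) : Decidable (Spec_floor_offset nber_passages1 nber_passages2 nber_passages3 floor_height star_increase spacing out) := by unfold Spec_floor_offset; infer_instance

-- ===== CLAIM (what is proved, stated in full; the proofs are below) =====
def Claim_equal_floor_offset : Prop := ∀ (nber_passages1 : Int) (nber_passages2 : Int) (nber_passages3 : Int) (floor_height : Int) (star_increase : Int) (spacing : Int), Dom_floor_offset nber_passages1 nber_passages2 nber_passages3 floor_height star_increase spacing → Spec_floor_offset nber_passages1 nber_passages2 nber_passages3 floor_height star_increase spacing (floor_offset nber_passages1 nber_passages2 nber_passages3 floor_height star_increase spacing)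

-- ===== LEMMAS AND PROOFS =====

-- folding "+2 / -1" over any list counts its length
theorem foldl_pass {α : Type} (l : List α) (s sp : Int) :
    l.foldl (fun (st : Int × Int) _ => (st.1 + 2, st.2 - 1)) (s, sp)
      = (s + 2 * l.length, sp - l.length) := by
  induction l generalizing s sp with
  | nil => simp
  | cons a t ih => simp [List.foldl_cons, ih]; constructor <;> ring

-- the counting loop is closed-form arithmetic
theorem passLoop_eq (k star_increase spacing : Int) :
    passLoop k star_increase spacing = (star_increase + 2 * max k 0, spacing - max k 0) := by
  unfold passLoop
  rw [foldl_pass, PySem.List.length_pyRange_one]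
  simp

-- A's inner loop finds no divisor in [i, n) iff it returns n
theorem ispremierLoop_eq_n_iff (n i : Int) (h2 : 2 ≤ i) (hin : i ≤ n) :
    ispremierLoop n i = n ↔ ∀ d : Int, i ≤ d → d < n → ¬ d ∣ n := by
  by_cases hlt : i < n
  · rw [ispremierLoop]
    by_cases hmod : PySem.Int.mod n i = 0
    · have hdvd : i ∣ n := (PySem.Int.mod_eq_zero_iff_dvd n i).mp hmod
      rw [if_neg (by tauto)]
      exact iff_of_false (by omega) (fun h => h i le_rfl hlt hdvd)
    · rw [if_pos ⟨hlt, hmod⟩,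
        ispremierLoop_eq_n_iff n (i + 1) (by omega) (by omega)]
      have hnd : ¬ i ∣ n := fun hdv => hmod ((PySem.Int.mod_eq_zero_iff_dvd n i).mpr hdv)
      constructor
      · intro h d hd hdn
        rcases eq_or_lt_of_le hd with rfl | hgt
        · exact hnd
        · exact h d (by omega) hdn
      · intro h d hd hdn
        exact h d (by omega) hdn
  · have hi : i = n := by omega
    rw [ispremierLoop, if_neg (by omega)]
    exact iff_of_true hi (fun d hd hdn _ => by omega)
termination_by (n - i).toNat
decreasing_by omega

theorem ispremier_iff (n : Int) (hn : 2 ≤ n) :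
    ispremier n = true ↔ ∀ d : Int, 2 ≤ d → d < n → ¬ d ∣ n := by
  unfold ispremier
  rw [← ispremierLoop_eq_n_iff n 2 le_rfl hn]
  by_cases he : ispremierLoop n 2 = n <;> simp [he]

-- B's loop tests exactly the odd candidates d, d+2, … with square ≤ n
theorem isPrimeAltLoop_iff (n : Int) (fuel : Nat) (d : Int)
    (hd : 3 ≤ d) (hodd : d % 2 = 1) (hfuel : (n + 1 - d).toNat ≤ fuel) :
    isPrimeAltLoop n fuel d = true ↔ ∀ e : Int, d ≤ e → e % 2 = 1 → e * e ≤ n → ¬ e ∣ n := by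
  induction fuel generalizing d with
  | zero =>
    have hnd : n + 1 ≤ d := by omega
    simp only [isPrimeAltLoop]
    exact iff_of_true trivial (fun e he hpar hsq hdvd => by nlinarith)
  | succ fuel ih =>
    rw [isPrimeAltLoop]
    by_cases hsq : d * d ≤ n
    · rw [if_pos hsq]
      by_cases hmod : PySem.Int.mod n d = 0
      · have hdvd : d ∣ n := (PySem.Int.mod_eq_zero_iff_dvd n d).mp hmod
        rw [if_pos hmod]
        exact iff_of_false (by simp) (fun h => h d le_rfl hodd hsq hdvd)
      · have hnd : ¬ d ∣ n := fun hdv => hmod ((PySem.Int.mod_eq_zero_iff_dvd n d).mpr hdv)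
        rw [if_neg hmod, ih (d + 2) (by omega) (by omega) (by omega)]
        constructor
        · intro h e he hpar hsq' hdvd
          rcases eq_or_lt_of_le he with rfl | hgt
          · exact hnd hdvd
          · exact h e (by omega) hpar hsq' hdvd
        · intro h e he hpar hsq' hdvd
          exact h e (by omega) hpar hsq' hdvd
    · rw [if_neg hsq]
      exact iff_of_true rfl (fun e he hpar hsq' hdvd => hsq (by nlinarith))

theorem isPrimeAlt_iff (n : Int) (hn : 5 < n) :
    isPrimeAlt n = true ↔ ∀ d : Int, 2 ≤ d → d < n → ¬ d ∣ n := by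
  unfold isPrimeAlt
  rw [if_neg (by omega)]
  by_cases h2 : PySem.Int.mod n 2 = 0
  · have hdvd : (2 : Int) ∣ n := (PySem.Int.mod_eq_zero_iff_dvd n 2).mp h2
    rw [if_pos h2]
    exact iff_of_false (by simp; omega) (fun h => h 2 le_rfl (by omega) hdvd)
  · have hodd : ¬ (2 : Int) ∣ n := fun hdv => h2 ((PySem.Int.mod_eq_zero_iff_dvd n 2).mpr hdv)
    rw [if_neg h2,
      isPrimeAltLoop_iff n n.toNat 3 (by omega) (by omega) (by omega)]
    constructor
    · intro h d hd hdn hdvd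
      -- n has a proper divisor, so its least factor m satisfies 3 ≤ m odd and m*m ≤ n
      have hnp : ¬ n.toNat.Prime := by
        intro hp
        have hdt : d.toNat ∣ n.toNat := Int.natCast_dvd_natCast.mp (by
          rw [Int.toNat_of_nonneg (by omega), Int.toNat_of_nonneg (by omega)]; exact hdvd)
        rcases (Nat.Prime.eq_one_or_self_of_dvd hp _ hdt) with h1 | h1 <;> omega
      have hmdvd : n.toNat.minFac ∣ n.toNat := Nat.minFac_dvd _
      have hm2 : 2 ≤ n.toNat.minFac := (Nat.minFac_prime (by omega)).two_le
      have hmsq : n.toNat.minFac * n.toNat.minFac ≤ n.toNat := by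
        have := Nat.minFac_sq_le_self (by omega) hnp
        simpa [Nat.pow_two] using this
      have hmint : (n.toNat.minFac : Int) ∣ n := by
        have := Int.natCast_dvd_natCast.mpr hmdvd
        rwa [Int.toNat_of_nonneg (by omega)] at this
      have hmodd : (n.toNat.minFac : Int) % 2 = 1 := by
        rcases Int.emod_two_eq_zero_or_one (n.toNat.minFac : Int) with he | he
        · exact absurd (dvd_trans (Int.dvd_of_emod_eq_zero he) hmint) hodd
        · exact he
      refine h (n.toNat.minFac : Int) (by omega) hmodd ?_ hmint
      have := Int.toNat_of_nonneg (show (0:Int) ≤ n by omega)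
      exact_mod_cast le_trans (Int.ofNat_le.mpr hmsq) (by omega)
    · intro h e he hpar hsq hdvd
      exact h e (by omega) (by nlinarith) hdvd

theorem prime_agree (n : Int) (hn : 5 < n) : ispremier n = isPrimeAlt n := by
  have h1 := ispremier_iff n (by omega)
  have h2 := isPrimeAlt_iff n hn
  by_cases h : ∀ d : Int, 2 ≤ d → d < n → ¬ d ∣ n
  · rw [h1.mpr h, h2.mpr h]
  · have e1 := mt h1.mp h
    have e2 := mt h2.mp h
    simp only [Bool.not_eq_true] at e1 e2
    rw [e1, e2]

theorem ispremier_false_of_three_dvd (n : Int) (hn : 5 < n) (h3 : PySem.Int.mod n 3 = 0) :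
    ispremier n = false := by
  have hdvd : (3 : Int) ∣ n := (PySem.Int.mod_eq_zero_iff_dvd n 3).mp h3
  have := mt (ispremier_iff n (by omega)).mp
    (fun h => h 3 (by omega) (by omega) hdvd)
  simpa using this

-- ===== VERDICT (by name: the statement is the Claim_ definition above) =====
theorem floor_offset_spec : Claim_equal_floor_offset := by
  intro p1 p2 p3 h s sp _
  unfold Spec_floor_offset floor_offset floorBlock2 floorBlock3 floor_offset_alt
  by_cases h5 : h > 5
  · by_cases h3 : (3 : Int) ∣ h
    · have h3' : PySem.Int.mod h 3 = 0 := (PySem.Int.mod_eq_zero_iff_dvd h 3).mpr h3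
      have hp : ispremier h = false := ispremier_false_of_three_dvd h h5 h3'
      simp [h5, h3, hp, passLoop_eq]
    · have h3' : ¬ PySem.Int.mod h 3 = 0 := fun hc => h3 ((PySem.Int.mod_eq_zero_iff_dvd h 3).mp hc)
      have hpa : ispremier h = isPrimeAlt h := prime_agree h h5
      by_cases hp : isPrimeAlt h = true
      · simp [h5, h3, hpa, hp, passLoop_eq]
      · simp [h5, h3, hpa, hp, passLoop_eq]
  · simp [h5]
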